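-- pv_equiv track=rewrite | github.com/HeoSeokYong/AlgorithmStudy | Two_Pointer/birthday_present.py | solution
-- ===== SOURCE A (Python) =====
-- from typing import List, Tuple, Callable
--
-- def solution(N:int, D:int, presents:List[Tuple]) -> int:
--     result = 0
--
--     presents.sort()
--
--     s, e = 0, 0
--     satisfaction = 0
--
--     while e < N:
--         scost, slev = presents[s]
--         ecost, elev = presents[e]
--
--         if ecost - scost >= D:
--             satisfaction -= slev
--             s += 1
--         else:
--             satisfaction += elev
--             e += 1
--
--             result = max(result, satisfaction)
--
--     return result
-- ===== SOURCE B (Python) =====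
-- def solution(N, D, presents):
--     presents.sort()
--     costs = [presents[i][0] for i in range(N)]
--     prefix = [0]
--     for i in range(N):
--         prefix.append(prefix[-1] + presents[i][1])
--     best = 0
--     for e in range(N):
--         target = costs[e] - D
--         lo, hi = 0, e
--         while lo < hi:
--             mid = (lo + hi) // 2
--             if costs[mid] <= target:
--                 lo = mid + 1
--             else:
--                 hi = mid
--         best = max(best, prefix[e + 1] - prefix[lo])
--     return best
-- ===== Notes on version B (the rewrite author's own statement) =====
-- stated objective: alternative
-- what changed: Replaces the two-pointer sliding window over the sorted list by prefix sums of levels plus, for each end index, a hand-written binary search for the smallest valid start, taking the running max of window sums.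
-- outside the precondition, e.g. on solution(2, -5, [(0, 1), (1, 2), (100, 3)]): A returns 0, B returns 2
import Mathlib
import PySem

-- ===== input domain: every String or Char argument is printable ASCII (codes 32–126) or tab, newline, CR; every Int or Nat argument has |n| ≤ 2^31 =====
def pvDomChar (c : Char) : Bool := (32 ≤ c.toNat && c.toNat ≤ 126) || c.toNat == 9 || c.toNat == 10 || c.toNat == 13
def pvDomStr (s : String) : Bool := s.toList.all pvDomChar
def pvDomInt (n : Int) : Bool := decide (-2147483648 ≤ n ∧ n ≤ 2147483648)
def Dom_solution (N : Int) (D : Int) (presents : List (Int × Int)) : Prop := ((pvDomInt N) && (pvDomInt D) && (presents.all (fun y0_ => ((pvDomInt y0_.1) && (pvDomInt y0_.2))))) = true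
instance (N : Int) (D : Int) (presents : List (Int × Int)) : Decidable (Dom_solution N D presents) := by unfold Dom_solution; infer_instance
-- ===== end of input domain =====

-- ===== PORT A =====
-- Port of A's two-pointer loop. Python's presents.sort() mutates its argument in
-- place (so does B's); the equivalence proved here is about the RETURN value only.
def solLoopA (pres : List (Int × Int)) (N D : Int) (s e : Nat) (sat res : Int) : Int :=
  if _h : (e : Int) < N then
    match _hs : PySem.List.pyGet? pres (s : Int), _he : PySem.List.pyGet? pres (e : Int) with
    | some se, some ee =>
      if D ≤ ee.1 - se.1 then
        solLoopA pres N D (s + 1) e (sat - se.2) res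
      else
        solLoopA pres N D s (e + 1) (sat + ee.2) (max res (sat + ee.2))
    | _, _ => res   -- IndexError in Python; excluded by Pre_solution
  else res
termination_by ((N - e).toNat, pres.length - s)
decreasing_by
  · apply Prod.Lex.right
    have : s < pres.length := by
      by_contra hge
      rw [PySem.List.pyGet?_natCast] at _hs
      simp [List.getElem?_eq_none (by omega : pres.length ≤ s)] at _hs
    omega
  · apply Prod.Lex.left
    omega

def solution (N : Int) (D : Int) (presents : List (Int × Int)) : Int :=
  let pres := PySem.List.sorted2 presents Prod.fst Prod.snd
  solLoopA pres N D 0 0 0 0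

-- ===== PORT B =====
-- B sorts, builds a costs list and a level prefix-sum list, and for each end index
-- binary-searches the smallest start whose cost is within D of the end's cost.
def bsLoop (costs : List Int) (target : Int) (lo hi : Nat) : Nat :=
  if lo < hi then
    let mid := (lo + hi) / 2
    if PySem.List.pyGetD costs (mid : Int) 0 ≤ target then bsLoop costs target (mid + 1) hi
    else bsLoop costs target lo mid
  else lo
termination_by hi - lo
decreasing_by
  · omega
  · omega

def solution_alt (N : Int) (D : Int) (presents : List (Int × Int)) : Int :=
  let pres := PySem.List.sorted2 presents Prod.fst Prod.snd
  let costs := (PySem.List.pyRange 0 N 1).map (fun i => (PySem.List.pyGetD pres i (0, 0)).1)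
  let pref := (PySem.List.pyRange 0 N 1).foldl
      (fun p i => p ++ [PySem.List.pyGetD p (-1) 0 + (PySem.List.pyGetD pres i (0, 0)).2]) [0]
  (PySem.List.pyRange 0 N 1).foldl
    (fun best e =>
      let target := PySem.List.pyGetD costs e 0 - D
      let lo := bsLoop costs target 0 e.toNat
      max best (PySem.List.pyGetD pref (e + 1) 0 - PySem.List.pyGetD pref (lo : Int) 0)) 0

-- ===== PRECONDITION & SPEC =====
-- Pre_ excludes exactly the inputs outside the task's natural domain (N > len, or
-- D <= 0 with N >= 1): there A's start pointer runs past the list and raises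
-- IndexError on almost all of them; on the rare D <= 0 inputs where it does return,
-- the value comes from leftover loop state with the start pointer beyond the end
-- pointer, an artefact no caller of this problem (D >= 1) can rely on.
def Pre_solution (N : Int) (D : Int) (presents : List (Int × Int)) : Prop :=
  N ≤ 0 ∨ (1 ≤ D ∧ N ≤ (presents.length : Int))
instance (N : Int) (D : Int) (presents : List (Int × Int)) : Decidable (Pre_solution N D presents) := by
  unfold Pre_solution; infer_instance

def pvWitness_solution : Int × Int × (List (Int × Int)) := (3, 2, [(1, 5), (2, 3), (4, 1)])

def Spec_solution (N : Int) (D : Int) (presents : List (Int × Int)) (out : Int) : Prop :=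
  out = solution_alt N D presents
instance (N : Int) (D : Int) (presents : List (Int × Int)) (out : Int) : Decidable (Spec_solution N D presents out) := by
  unfold Spec_solution; infer_instance

-- ===== CLAIM (what is proved, stated in full; the proofs are below) =====
def Claim_equal_solution : Prop := ∀ (N : Int) (D : Int) (presents : List (Int × Int)),
  Dom_solution N D presents → Pre_solution N D presents → Spec_solution N D presents (solution N D presents)

-- ===== LEMMAS AND PROOFS =====

-- first/second components of the i-th element, and level sums over index windows
def cIdx (L : List (Int × Int)) (i : Nat) : Int := (L.getD i (0, 0)).1
def vIdx (L : List (Int × Int)) (i : Nat) : Int := (L.getD i (0, 0)).2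
def wSum (L : List (Int × Int)) (a b : Nat) : Int := ∑ i ∈ Finset.Ico a b, vIdx L i

-- Python's tuple '<' as used by sorted2 on pairs
def pvLtf (a b : Int × Int) : Bool := decide (a.1 < b.1) || (!decide (b.1 < a.1) && decide (a.2 < b.2))

def pvR (a b : Int × Int) : Prop := pvLtf b a = false

lemma insertBy_pairwise (x : Int × Int) (ys : List (Int × Int)) (h : ys.Pairwise pvR) :
    (PySem.List.insertBy pvLtf x ys).Pairwise pvR := by
  induction ys with
  | nil => simp [PySem.List.insertBy]
  | cons y ys ih =>
    rw [List.pairwise_cons] at h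
    by_cases hb : pvLtf x y = true
    · simp only [PySem.List.insertBy, hb, if_true]
      refine List.pairwise_cons.2 ⟨?_, List.pairwise_cons.2 ⟨h.1, h.2⟩⟩
      intro z hz
      rcases List.mem_cons.1 hz with rfl | hz
      · simp [pvLtf, pvR] at hb ⊢; omega
      · have hyz := h.1 z hz
        simp [pvLtf, pvR] at hb hyz ⊢; omega
    · simp only [PySem.List.insertBy, hb]
      refine List.pairwise_cons.2 ⟨?_, ih h.2⟩
      intro z hz
      rcases (PySem.List.mem_insertBy _ _ _ _).1 hz with rfl | hz
      · simpa [pvR] using hb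
      · exact h.1 z hz

lemma foldl_insertBy_pairwise (xs acc : List (Int × Int)) (h : acc.Pairwise pvR) :
    (xs.foldl (fun acc x => PySem.List.insertBy pvLtf x acc) acc).Pairwise pvR := by
  induction xs generalizing acc with
  | nil => simpa using h
  | cons x xs ih => exact ih _ (insertBy_pairwise x acc h)

lemma sorted2_pairwise_pvR (xs : List (Int × Int)) :
    (PySem.List.sorted2 xs Prod.fst Prod.snd).Pairwise pvR := by
  have : PySem.List.sorted2 xs Prod.fst Prod.snd
      = xs.foldl (fun acc x => PySem.List.insertBy pvLtf x acc) [] := by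
    simp only [PySem.List.sorted2]
    rfl
  rw [this]
  exact foldl_insertBy_pairwise xs [] (by simp)

lemma sorted2_fst_mono (xs : List (Int × Int)) :
    ∀ i j, i ≤ j → j < (PySem.List.sorted2 xs Prod.fst Prod.snd).length →
      cIdx (PySem.List.sorted2 xs Prod.fst Prod.snd) i ≤ cIdx (PySem.List.sorted2 xs Prod.fst Prod.snd) j := by
  intro i j hij hj
  rcases eq_or_lt_of_le hij with rfl | hlt
  · exact le_refl _
  · have hp := (List.pairwise_iff_getElem).1 (sorted2_pairwise_pvR xs) i j (by omega) hj hlt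
    have hi : i < (PySem.List.sorted2 xs Prod.fst Prod.snd).length := by omega
    rw [cIdx, cIdx, List.getD_eq_getElem _ _ hi, List.getD_eq_getElem _ _ hj]
    simp [pvR, pvLtf] at hp; omega

lemma bs_spec (costs : List Int) (L : List (Int × Int)) (n : Nat) (target : Int)
    (hc : ∀ k : Nat, k < n → PySem.List.pyGetD costs (k : Int) 0 = cIdx L k)
    (hmono : ∀ i j, i ≤ j → j < n → cIdx L i ≤ cIdx L j) :
    ∀ k lo hi, hi - lo ≤ k → lo ≤ hi → hi ≤ n →
      (∀ j < lo, cIdx L j ≤ target) → (∀ j, hi ≤ j → j < n → target < cIdx L j) →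
      lo ≤ bsLoop costs target lo hi ∧ bsLoop costs target lo hi ≤ hi ∧
      (∀ j < bsLoop costs target lo hi, cIdx L j ≤ target) ∧
      (∀ j, bsLoop costs target lo hi ≤ j → j < n → target < cIdx L j) := by
  intro k
  induction k with
  | zero =>
    intro lo hi hk hlh hhn hlow hhigh
    have : hi = lo := by omega
    subst this
    rw [bsLoop]; simp only [lt_irrefl, if_false]
    exact ⟨le_refl _, le_refl _, hlow, hhigh⟩
  | succ k ih =>
    intro lo hi hk hlh hhn hlow hhigh
    rw [bsLoop]
    by_cases hlt : lo < hi
    · simp only [hlt, if_true]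
      set mid := (lo + hi) / 2 with hmid
      have hmlt : mid < hi := by omega
      have hmge : lo ≤ mid := by omega
      have hcm : PySem.List.pyGetD costs (mid : Int) 0 = cIdx L mid := hc mid (by omega)
      by_cases hle : PySem.List.pyGetD costs (mid : Int) 0 ≤ target
      · simp only [hle, if_true]
        refine ?_
        have hlow' : ∀ j < mid + 1, cIdx L j ≤ target := by
          intro j hj
          by_cases hjlo : j < lo
          · exact hlow j hjlo
          · calc cIdx L j ≤ cIdx L mid := hmono j mid (by omega) (by omega)
              _ ≤ target := by rwa [hcm] at hle
        have h := ih (mid + 1) hi (by omega) (by omega) hhn hlow' hhigh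
        exact ⟨by omega, h.2.1, h.2.2.1, h.2.2.2⟩
      · simp only [hle, if_false]
        have hhigh' : ∀ j, mid ≤ j → j < n → target < cIdx L j := by
          intro j hj hjn
          calc target < cIdx L mid := by rw [hcm] at hle; omega
            _ ≤ cIdx L j := hmono mid j hj hjn
        have h := ih lo mid (by omega) (by omega) (by omega) hlow hhigh'
        exact ⟨h.1, by omega, h.2.2.1, h.2.2.2⟩
    · simp only [hlt, if_false]
      exact ⟨le_refl _, by omega, hlow, fun j hj hjn => hhigh j (by omega) hjn⟩

lemma prefix_eq (L : List (Int × Int)) (m : Nat) :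
    (PySem.List.pyRange 0 (m : Int) 1).foldl
      (fun p i => p ++ [PySem.List.pyGetD p (-1) 0 + (PySem.List.pyGetD L i (0, 0)).2]) [0]
    = (List.range (m + 1)).map (wSum L 0) := by
  induction m with
  | zero =>
    simp [wSum]
  | succ m ih =>
    have hr : PySem.List.pyRange 0 ((m : Int) + 1) 1
        = PySem.List.pyRange 0 (m : Int) 1 ++ [(m : Int)] := by
      exact PySem.List.pyRange_one_succ_right (by omega)
    push_cast
    rw [hr, List.foldl_append, ih]
    simp only [List.foldl]
    have hrange : (List.range (m + 1)).map (wSum L 0)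
        = (List.range m).map (wSum L 0) ++ [wSum L 0 m] := by
      rw [List.range_succ, List.map_append]; rfl
    rw [hrange, PySem.List.pyGetD_neg_one_append_singleton]
    have : wSum L 0 m + (PySem.List.pyGetD L (m : Int) (0, 0)).2 = wSum L 0 (m + 1) := by
      rw [PySem.List.pyGetD_natCast]
      rw [wSum, wSum, Finset.sum_Ico_succ_top (by omega)]
      rfl
    rw [this, ← hrange]
    simp [List.range_succ]

lemma loopA_eq (L : List (Int × Int)) (N D : Int) (n : Nat) (hNn : N = (n : Int))
    (hn : n ≤ L.length) (hD : 1 ≤ D)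
    (hmono : ∀ i j, i ≤ j → j < L.length → cIdx L i ≤ cIdx L j) :
    ∀ k s e (sat res : Int), (n - e) * (L.length + 1) + (L.length - s) ≤ k →
      s ≤ e → e ≤ n →
      (e < n → ∀ j < s, D ≤ cIdx L e - cIdx L j) →
      sat = wSum L s e →
      solLoopA L N D s e sat res =
        (PySem.List.pyRange (e : Int) N 1).foldl
          (fun best i =>
            max best (PySem.List.pyGetD ((List.range (n + 1)).map (wSum L 0)) (i + 1) 0 -
              PySem.List.pyGetD ((List.range (n + 1)).map (wSum L 0))
                ((bsLoop ((PySem.List.pyRange 0 N 1).map (fun x => (PySem.List.pyGetD L x (0, 0)).1))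
                    (PySem.List.pyGetD ((PySem.List.pyRange 0 N 1).map (fun x => (PySem.List.pyGetD L x (0, 0)).1)) i 0 - D)
                    0 i.toNat : Nat) : Int) 0)) res := by
  -- abbreviations and shared facts
  subst hNn
  set costs := ((PySem.List.pyRange 0 (n : Int) 1).map (fun x => (PySem.List.pyGetD L x (0, 0)).1)) with hcosts_def
  have hcosts : ∀ k : Nat, k < n → PySem.List.pyGetD costs (k : Int) 0 = cIdx L k := by
    intro k hk
    rw [hcosts_def, PySem.List.pyGetD_map_pyRange _ n k _ hk, PySem.List.pyGetD_natCast]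
    rfl
  have hpref : ∀ k : Nat, k ≤ n →
      PySem.List.pyGetD ((List.range (n + 1)).map (wSum L 0)) (k : Int) 0 = wSum L 0 k := by
    intro k hk
    rw [PySem.List.pyGetD_natCast, PySem.List.getD_map_range _ _ _ _ (by omega)]
  have hmono' : ∀ i j, i ≤ j → j < n → cIdx L i ≤ cIdx L j := fun i j h1 h2 => hmono i j h1 (by omega)
  intro k
  induction k with
  | zero =>
    intro s e sat res hk hse hen hq hsat
    have he : ¬ ((e : Int) < (n : Int)) := by
      by_contra h
      have : e < n := by exact_mod_cast h
      have hmul : L.length + 1 ≤ (n - e) * (L.length + 1) := Nat.le_mul_of_pos_left _ (by omega)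
      omega
    rw [solLoopA]
    simp only [he, dif_neg, not_false_iff]
    rw [PySem.List.pyRange_one_eq_nil (by omega : (n:Int) ≤ (e:Int))]
    rfl
  | succ k ih =>
    intro s e sat res hk hse hen hq hsat
    by_cases he : (e : Int) < (n : Int)
    · have hen' : e < n := by exact_mod_cast he
      have hsl : s < L.length := by omega
      have hel : e < L.length := by omega
      have hgs : PySem.List.pyGet? L (s : Int) = some L[s] := by
        rw [PySem.List.pyGet?_natCast]; exact List.getElem?_eq_getElem hsl
      have hge : PySem.List.pyGet? L (e : Int) = some L[e] := by
        rw [PySem.List.pyGet?_natCast]; exact List.getElem?_eq_getElem hel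
      have hcs : cIdx L s = L[s].1 := by rw [cIdx, List.getD_eq_getElem _ _ hsl]
      have hce : cIdx L e = L[e].1 := by rw [cIdx, List.getD_eq_getElem _ _ hel]
      rw [solLoopA]
      simp only [he, dif_pos]
      rw [hgs, hge]   -- reduce the match
      by_cases hbr : D ≤ L[e].1 - L[s].1
      · simp only [hbr, if_pos]
        have hslt : s < e := by
          rcases Nat.lt_or_ge s e with h | h
          · exact h
          · have : s = e := by omega
            subst this
            omega
        have hq' : e < n → ∀ j < s + 1, D ≤ cIdx L e - cIdx L j := by
          intro _ j hj
          rcases Nat.lt_or_ge j s with h | h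
          · exact hq hen' j h
          · have : j = s := by omega
            subst this
            rw [hcs, hce]; omega
        have hsat' : sat - L[s].2 = wSum L (s + 1) e := by
          rw [hsat, wSum, wSum, Finset.sum_eq_sum_Ico_succ_bot hslt]
          have : vIdx L s = L[s].2 := by rw [vIdx, List.getD_eq_getElem _ _ hsl]
          omega
        rw [ih (s+1) e _ res (by omega) (by omega) hen hq' hsat']
      · simp only [hbr, if_neg, not_false_iff]
        -- the recorded window: s is exactly what the binary search finds
        have htgt : cIdx L e - D < cIdx L s := by rw [hcs, hce]; omega
        have hbs := bs_spec costs L n (cIdx L e - D) hcosts hmono' e 0 e (by omega) (by omega) (by omega)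
          (by intro j hj; omega)
          (by intro j hj hjn
              have := hmono' e j hj hjn
              omega)
        have hbseq : bsLoop costs (cIdx L e - D) 0 e = s := by
          rcases Nat.lt_trichotomy (bsLoop costs (cIdx L e - D) 0 e) s with h | h | h
          · have h1 := hq hen' _ h
            have h2 := hbs.2.2.2 _ (le_refl _) (by omega)
            omega
          · exact h
          · have h1 := hbs.2.2.1 s h
            omega
        have hsat' : sat + L[e].2 = wSum L s (e + 1) := by
          rw [hsat, wSum, wSum, Finset.sum_Ico_succ_top (by omega)]
          have : vIdx L e = L[e].2 := by rw [vIdx, List.getD_eq_getElem _ _ hel]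
          omega
        have hstep : (n - (e+1)) * (L.length + 1) + (L.length + 1) ≤ (n - e) * (L.length + 1) := by
          have h1 : (n - (e+1)) + 1 ≤ n - e := by omega
          calc (n - (e+1)) * (L.length + 1) + (L.length + 1)
              = ((n - (e+1)) + 1) * (L.length + 1) := by ring
            _ ≤ (n - e) * (L.length + 1) := Nat.mul_le_mul_right _ h1
        rw [ih s (e+1) _ _ (by omega) (by omega) (by omega)
          (by intro h j hj
              have h1 := hq hen' j hj
              have := hmono' e (e+1) (by omega) h
              omega)
          hsat']
        rw [PySem.List.pyRange_one_cons he]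
        simp only [List.foldl_cons]
        have hcast : ((e : Int) + 1) = ((e + 1 : Nat) : Int) := by push_cast; ring
        rw [hcast]
        congr 1
        have h2 : (e : Int).toNat = e := by omega
        rw [hpref (e+1) (by omega), h2]
        have h3 : PySem.List.pyGetD costs (e : Int) 0 = cIdx L e := hcosts e hen'
        rw [h3, hbseq, hpref s (by omega)]
        have hsplit : wSum L 0 (e+1) - wSum L 0 s = wSum L s (e+1) := by
          rw [wSum, wSum, wSum, ← Finset.sum_Ico_consecutive _ (by omega : 0 ≤ s) (by omega : s ≤ e + 1)]
          ring
        rw [hsplit, ← hsat']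
    · rw [solLoopA]
      simp only [he, dif_neg, not_false_iff]
      rw [PySem.List.pyRange_one_eq_nil (by omega : ((n : Nat) : Int) ≤ (e : Int))]
      rfl

-- ===== VERDICT (by name: the statement is the Claim_ definition above) =====
theorem solution_spec : Claim_equal_solution := by
  intro N D presents _hdom hpre
  unfold Spec_solution solution solution_alt
  by_cases hN : N ≤ 0
  · have hc : ¬ (((0 : Nat) : Int) < N) := by push_cast; omega
    rw [solLoopA, dif_neg hc, PySem.List.pyRange_one_eq_nil hN]
    rfl
  · have hD : 1 ≤ D := by
      rcases hpre with h | h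
      · omega
      · exact h.1
    have hlen : N ≤ (presents.length : Int) := by
      rcases hpre with h | h
      · omega
      · exact h.2
    set L := PySem.List.sorted2 presents Prod.fst Prod.snd with hL
    have hlenL : L.length = presents.length := (PySem.List.sorted2_perm presents Prod.fst Prod.snd false).length_eq
    set n := N.toNat with hn
    have hNn : N = (n : Int) := by omega
    have hnl : n ≤ L.length := by omega
    have hmono : ∀ i j, i ≤ j → j < L.length → cIdx L i ≤ cIdx L j := by
      intro i j h1 h2
      exact sorted2_fst_mono presents i j h1 (by rw [← hL]; omega)
    rw [loopA_eq L N D n hNn hnl hD hmono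
      ((n - 0) * (L.length + 1) + (L.length - 0)) 0 0 0 0 (le_refl _) (by omega) (by omega)
      (fun _ j hj => absurd hj (by omega)) (by simp [wSum])]
    simp only [hNn, prefix_eq]
    norm_num
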